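-- pv_equiv track=rewrite | github.com/timvink/mkdocs-enumerate-headings-plugin | mkdocs_enumerate_headings_plugin/utils.py | chapter_numbers
-- ===== SOURCE A (Python) =====
-- from typing import List
--
-- def chapter_numbers(n_chapters_per_page: List):
--
--     # First chapter should always be 1
--     # Even if there is no heading 1
--     if n_chapters_per_page[0] == 0:
--         n_chapters_per_page[0] = 1
--
--     chapters = []
--     for i, c in enumerate(n_chapters_per_page):
--         if i == 0:
--             chapters.append(min(c, 1))
--         else:
--             chapters.append(min(c, 1) + sum(n_chapters_per_page[:i]))
--     return chapters
-- ===== SOURCE B (Python) =====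
-- from typing import List
--
-- def chapter_numbers(n_chapters_per_page: List):
--     # First chapter should always be 1, even if there is no heading 1
--     if n_chapters_per_page[0] == 0:
--         n_chapters_per_page[0] = 1
--
--     chapters = []
--     total = 0
--     for c in n_chapters_per_page:
--         chapters.append(min(c, 1) + total)
--         total += c
--     return chapters
-- ===== Notes on version B (the rewrite author's own statement) =====
-- stated objective: faster
-- what changed: B keeps a running prefix sum in a single pass instead of recomputing sum(n_chapters_per_page[:i]) from scratch for every index, removing the inner scan.
import Mathlib
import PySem

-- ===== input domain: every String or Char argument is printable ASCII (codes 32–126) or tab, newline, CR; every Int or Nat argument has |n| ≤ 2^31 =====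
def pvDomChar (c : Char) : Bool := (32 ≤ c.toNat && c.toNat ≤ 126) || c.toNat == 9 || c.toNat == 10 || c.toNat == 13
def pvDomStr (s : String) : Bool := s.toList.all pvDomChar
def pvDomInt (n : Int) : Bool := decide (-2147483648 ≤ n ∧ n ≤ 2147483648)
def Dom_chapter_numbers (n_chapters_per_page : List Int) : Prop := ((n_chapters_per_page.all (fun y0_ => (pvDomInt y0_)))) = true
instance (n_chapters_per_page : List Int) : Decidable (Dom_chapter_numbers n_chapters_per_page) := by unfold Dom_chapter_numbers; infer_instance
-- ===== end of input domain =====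

-- B replaces A's per-index sum(n[:i]) inner scan by a single pass with a running prefix sum (O(n) vs O(n^2)).
-- Both A and B mutate the argument in place (n[0] = 1 when n[0] == 0); the equivalence proved here is about the return value.

-- ===== PORT A =====
-- A mutates the list first; in the port the mutated list is the local m.
def chapter_numbers (n_chapters_per_page : List Int) : List Int :=
  let m : List Int :=
    match n_chapters_per_page with
    | [] => []   -- Python raises IndexError here; excluded by Pre_
    | c0 :: rest => (if c0 = 0 then (1 : Int) else c0) :: rest
  (PySem.List.enumerate m 0).foldl
    (fun chapters ic =>
      if ic.1 = 0 then chapters ++ [min ic.2 1]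
      else chapters ++ [min ic.2 1 + (PySem.List.slice m none (some ic.1)).sum]) []

-- ===== PORT B =====
-- the for-loop of Source B: one pass, 'total' is the running prefix sum
def chapterAltGo : List Int → Int → List Int
  | [], _ => []
  | c :: rest, total => (min c 1 + total) :: chapterAltGo rest (total + c)

def chapter_numbers_alt (n_chapters_per_page : List Int) : List Int :=
  match n_chapters_per_page with
  | [] => []   -- Python raises IndexError here; excluded by Pre_
  | c0 :: rest => chapterAltGo ((if c0 = 0 then (1 : Int) else c0) :: rest) 0

-- ===== PRECONDITION & SPEC =====
-- Python A raises IndexError on the empty list (n_chapters_per_page[0]); B raises there too.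
def Pre_chapter_numbers (n_chapters_per_page : List Int) : Prop := n_chapters_per_page ≠ []
instance (n_chapters_per_page : List Int) : Decidable (Pre_chapter_numbers n_chapters_per_page) := by unfold Pre_chapter_numbers; infer_instance
def pvWitness_chapter_numbers : List Int := [0, 2, 1]

def Spec_chapter_numbers (n_chapters_per_page : List Int) (out : List Int) : Prop := out = chapter_numbers_alt n_chapters_per_page
instance (n_chapters_per_page : List Int) (out : List Int) : Decidable (Spec_chapter_numbers n_chapters_per_page out) := by unfold Spec_chapter_numbers; infer_instance

-- ===== CLAIM (what is proved, stated in full; the proofs are below) =====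
def Claim_equal_chapter_numbers : Prop := ∀ (n_chapters_per_page : List Int), Dom_chapter_numbers n_chapters_per_page → Pre_chapter_numbers n_chapters_per_page → Spec_chapter_numbers n_chapters_per_page (chapter_numbers n_chapters_per_page)

-- ===== LEMMAS AND PROOFS =====

theorem foldl_if_append {α β : Type} (l : List α) (p : α → Prop) [DecidablePred p]
    (f g : α → β) (acc : List β) :
    l.foldl (fun a x => if p x then a ++ [f x] else a ++ [g x]) acc =
      acc ++ l.map (fun x => if p x then f x else g x) := by
  induction l generalizing acc with
  | nil => simp
  | cons x xs ih =>
    simp only [List.foldl_cons, List.map_cons]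
    by_cases hx : p x <;> simp [hx, ih]

theorem chapterAltGo_length (xs : List Int) (t : Int) : (chapterAltGo xs t).length = xs.length := by
  induction xs generalizing t with
  | nil => rfl
  | cons c rest ih => simp [chapterAltGo, ih]

theorem chapterAltGo_getElem (xs : List Int) (t : Int) (i : Nat) (h : i < xs.length) :
    (chapterAltGo xs t)[i]'(by rw [chapterAltGo_length]; exact h) =
      min xs[i] 1 + t + (xs.take i).sum := by
  induction xs generalizing t i with
  | nil => simp at h
  | cons c rest ih =>
    cases i with
    | zero => simp [chapterAltGo]
    | succ j =>
      simp only [chapterAltGo, List.getElem_cons_succ, List.take_succ_cons, List.sum_cons]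
      rw [ih _ _ (by simpa using h)]
      ring

-- A's fold over enumerate equals B's single pass
theorem chapterA_eq_go (m : List Int) :
    ((PySem.List.enumerate m 0).foldl
      (fun chapters ic =>
        if ic.1 = 0 then chapters ++ [min ic.2 1]
        else chapters ++ [min ic.2 1 + (PySem.List.slice m none (some ic.1)).sum]) []) =
    chapterAltGo m 0 := by
  rw [foldl_if_append (PySem.List.enumerate m 0) (fun ic => ic.1 = 0)
      (fun ic => min ic.2 1)
      (fun ic => min ic.2 1 + (PySem.List.slice m none (some ic.1)).sum) []]
  apply List.ext_getElem
  · simp [chapterAltGo_length]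
  · intro i h1 h2
    simp only [List.nil_append, List.getElem_map, PySem.List.getElem_enumerate]
    rw [chapterAltGo_getElem m 0 i (by simpa [chapterAltGo_length] using h2)]
    simp only [zero_add, PySem.List.slice_to_natCast, add_zero]
    by_cases hi : i = 0
    · subst hi; simp
    · rw [if_neg (show ((i : Nat) : Int) ≠ 0 by exact_mod_cast hi)]

-- ===== VERDICT (by name: the statement is the Claim_ definition above) =====
theorem chapter_numbers_spec : Claim_equal_chapter_numbers := by
  intro xs _ hpre
  unfold Spec_chapter_numbers chapter_numbers chapter_numbers_alt
  cases xs with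
  | nil => exact absurd rfl hpre
  | cons c0 rest => simpa using chapterA_eq_go ((if c0 = 0 then (1 : Int) else c0) :: rest)
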